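-- pv_equiv track=rewrite | github.com/OneVth/programmers-python | Lv0/181854/solution.py | solution_v1
-- ===== SOURCE A (Python) =====
-- def solution_v1(arr: list[int], n: int) -> list[int]:
--     """
--     [Approach] 원본 배열 직접 수정 (in-place)
--     [Time] O(n) - 배열 순회
--     [Space] O(1) - 추가 공간 없음 (원본 수정)
--     [Note] 원본 arr이 변경됨 - 부작용 주의
--     """
--     l = len(arr)
--     if l % 2 == 1:
--         for i in range(l):
--             if i % 2 == 0:
--                 arr[i] += n
--     else:
--         for i in range(l):
--             if i % 2 == 1:
--                 arr[i] += n
--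
--     return arr
-- ===== SOURCE B (Python) =====
-- def solution_v1(arr: list[int], n: int) -> list[int]:
--     # Observation: in both length-parity cases, A bumps exactly the indices that
--     # share the parity of the LAST index, i.e. every other element counted from
--     # the end. So walk the list back-to-front with a toggling flag, build the
--     # bumped output, and splice it back into arr (same in-place mutation).
--     out = []
--     bump = True
--     for x in reversed(arr):
--         out.append(x + n if bump else x)
--         bump = not bump
--     out.reverse()
--     arr[:] = out
--     return arr
-- ===== Notes on version B (the rewrite author's own statement) =====
-- stated objective: alternative
-- what changed: Instead of A's two length-parity branches each scanning all indices with an i%2 test, B walks the list back-to-front with a toggling flag (the bumped indices are exactly every other element counted from the end), builds the output list and splices it back into arr.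
import Mathlib
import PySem

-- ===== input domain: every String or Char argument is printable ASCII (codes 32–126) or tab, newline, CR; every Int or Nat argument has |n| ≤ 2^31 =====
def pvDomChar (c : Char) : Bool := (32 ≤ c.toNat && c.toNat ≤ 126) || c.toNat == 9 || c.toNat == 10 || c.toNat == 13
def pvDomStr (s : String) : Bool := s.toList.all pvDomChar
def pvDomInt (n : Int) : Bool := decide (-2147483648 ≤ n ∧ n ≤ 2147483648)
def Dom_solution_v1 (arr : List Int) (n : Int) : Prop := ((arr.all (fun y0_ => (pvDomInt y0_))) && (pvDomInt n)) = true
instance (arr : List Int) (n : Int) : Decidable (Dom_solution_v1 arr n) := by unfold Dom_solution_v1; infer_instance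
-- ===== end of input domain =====

-- B replaces A's two length-parity branches (each scanning every index with an i%2 test)
-- by a back-to-front walk with a toggling flag: the bumped indices are exactly every other
-- element counted from the end. Both Pythons mutate arr in place and return it; the
-- equivalence proved here is about the returned value (which equals the mutated contents).

-- ===== PORT A =====
-- 'arr[i] += n' is ported as set i.toNat (pyGetD a i 0 + n): i comes from range(l),
-- so 0 ≤ i < len a and both pyGetD and toNat are exact there.
def solution_v1 (arr : List Int) (n : Int) : List Int :=
  -- l = len(arr), inlined
  if PySem.Int.mod (arr.length : Int) 2 == 1 then
    (PySem.List.pyRange 0 (arr.length : Int) 1).foldl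
      (fun a i => if PySem.Int.mod i 2 == 0 then a.set i.toNat (PySem.List.pyGetD a i 0 + n) else a) arr
  else
    (PySem.List.pyRange 0 (arr.length : Int) 1).foldl
      (fun a i => if PySem.Int.mod i 2 == 1 then a.set i.toNat (PySem.List.pyGetD a i 0 + n) else a) arr

-- ===== PORT B =====
-- state = (out, bump); 'for x in reversed(arr)' is a fold over arr.reverse;
-- 'out.reverse(); arr[:] = out; return arr' returns the reversed out.
def solution_v1_alt (arr : List Int) (n : Int) : List Int :=
  ((arr.reverse.foldl
      (fun (s : List Int × Bool) x => (s.1 ++ [if s.2 then x + n else x], !s.2))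
      ([], true)).1).reverse

-- ===== PRECONDITION & SPEC =====
def Spec_solution_v1 (arr : List Int) (n : Int) (out : List Int) : Prop := out = solution_v1_alt arr n
instance (arr : List Int) (n : Int) (out : List Int) : Decidable (Spec_solution_v1 arr n out) := by unfold Spec_solution_v1; infer_instance

-- ===== CLAIM (what is proved, stated in full; the proofs are below) =====
def Claim_equal_solution_v1 : Prop := ∀ (arr : List Int) (n : Int), Dom_solution_v1 arr n → Spec_solution_v1 arr n (solution_v1 arr n)

-- ===== LEMMAS AND PROOFS =====

-- ---- A side: characterisation of the conditional in-place-add fold ----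

theorem pv_foldl_upd_length (n : Int) (P : Int → Bool) (idxs : List Int) :
    ∀ (a : List Int),
      (idxs.foldl (fun a i => if P i then a.set i.toNat (PySem.List.pyGetD a i 0 + n) else a) a).length
        = a.length := by
  induction idxs with
  | nil => intro a; rfl
  | cons i idxs ih =>
      intro a
      simp only [List.foldl_cons]
      rw [ih]
      split <;> simp

theorem pv_foldl_upd_getD (n : Int) (P : Int → Bool) (idxs : List Int) :
    ∀ (a : List Int), (∀ i ∈ idxs, 0 ≤ i ∧ i < (a.length : Int)) →
      ∀ (j : Nat), j < a.length →
      (idxs.foldl (fun a i => if P i then a.set i.toNat (PySem.List.pyGetD a i 0 + n) else a) a).getD j 0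
        = a.getD j 0 + n * (((idxs.filter P).count (j : Int) : Int)) := by
  induction idxs with
  | nil => intro a _ j hj; simp
  | cons i idxs ih =>
      intro a hb j hj
      obtain ⟨hi0, hil⟩ := hb i (by simp)
      simp only [List.foldl_cons]
      have hlen : (if P i then a.set i.toNat (PySem.List.pyGetD a i 0 + n) else a).length = a.length := by
        split <;> simp
      rw [ih _ (fun i' hi' => by rw [hlen]; exact hb i' (List.mem_cons_of_mem _ hi'))
            j (by rw [hlen]; exact hj)]
      have hgd : ∀ (xs : List Int) (h : j < xs.length), xs.getD j 0 = xs[j]'h := by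
        intro xs h; exact List.getD_eq_getElem xs 0 h
      by_cases hP : P i
      · simp only [hP, if_true]
        have hcc : ((List.filter P (i :: idxs)).count ((j : Int)) : Int)
            = ((List.filter P idxs).count ((j : Int)) : Int) + (if i = (j : Int) then 1 else 0) := by
          simp only [List.filter_cons, hP, if_true, List.count_cons, beq_iff_eq]
          split <;> simp
        rw [hcc, hgd _ (by simpa using hj), List.getElem_set]
        by_cases hij : i = (j : Int)
        · have ht : i.toNat = j := by omega
          rw [if_pos ht, if_pos hij, PySem.List.pyGetD_of_nonneg a 0 hi0, ht]
          ring
        · have ht : ¬ i.toNat = j := by omega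
          rw [if_neg ht, if_neg hij, hgd _ hj]
          ring
      · simp only [Bool.not_eq_true] at hP
        simp [hP]

theorem pv_count_filter_nodup (idxs : List Int) (P : Int → Bool) (j : Int)
    (hnd : idxs.Nodup) :
    (((idxs.filter P).count j : Int)) = if j ∈ idxs ∧ P j then 1 else 0 := by
  have hnd' : (idxs.filter P).Nodup := hnd.filter P
  by_cases h : j ∈ idxs ∧ P j
  · have hm : j ∈ idxs.filter P := List.mem_filter.mpr ⟨h.1, h.2⟩
    rw [if_pos h, List.count_eq_one_of_mem hnd' hm]
    simp
  · have hm : j ∉ idxs.filter P := by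
      intro hc
      exact h ⟨(List.mem_filter.mp hc).1, (List.mem_filter.mp hc).2⟩
    rw [if_neg h, List.count_eq_zero_of_not_mem hm]
    simp

-- ---- B side: the fold builds pvMark, a structurally recursive marking ----

def pvMark (n : Int) : List Int → Bool → List Int
  | [], _ => []
  | x :: xs, b => (if b then x + n else x) :: pvMark n xs (!b)

theorem pv_foldl_mark (n : Int) (xs : List Int) :
    ∀ (acc : List Int) (b : Bool),
      (xs.foldl (fun (s : List Int × Bool) x => (s.1 ++ [if s.2 then x + n else x], !s.2)) (acc, b)).1
        = acc ++ pvMark n xs b := by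
  induction xs with
  | nil => intro acc b; simp [pvMark]
  | cons x xs ih =>
      intro acc b
      simp only [List.foldl_cons, pvMark]
      rw [ih]
      simp

theorem pvMark_length (n : Int) (xs : List Int) : ∀ (b : Bool), (pvMark n xs b).length = xs.length := by
  induction xs with
  | nil => intro b; rfl
  | cons x xs ih => intro b; simp [pvMark, ih]

theorem pvMark_getD (n : Int) (xs : List Int) :
    ∀ (b : Bool) (i : Nat), i < xs.length →
      (pvMark n xs b).getD i 0
        = xs.getD i 0 + (if (i % 2 == 0) == b then n else 0) := by
  induction xs with
  | nil => intro b i hi; simp at hi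
  | cons x xs ih =>
      intro b i hi
      cases i with
      | zero => cases b <;> simp [pvMark]
      | succ i =>
          simp only [pvMark, List.getD_cons_succ]
          rw [ih (!b) i (by simpa using hi)]
          have : ((i % 2 == 0) == !b) = (((i + 1) % 2 == 0) == b) := by
            have h2 : (i + 1) % 2 = 1 - i % 2 := by omega
            rcases (by omega : i % 2 = 0 ∨ i % 2 = 1) with h | h <;> cases b <;> simp [h, h2]
          rw [this]

-- ---- main proof ----

theorem solution_v1_spec : Claim_equal_solution_v1 := by
  intro arr n _
  unfold Spec_solution_v1 solution_v1 solution_v1_alt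
  set l : Int := (arr.length : Int) with hl
  have hmod1 : PySem.Int.mod l 2 = l % 2 := PySem.Int.mod_eq_emod_of_pos (by norm_num)
  have hbound1 : ∀ i ∈ PySem.List.pyRange 0 l 1, 0 ≤ i ∧ i < (arr.length : Int) := by
    intro i hi
    have := PySem.List.mem_pyRange_one.mp hi
    exact ⟨this.1, by omega⟩
  have hBlen : (((arr.reverse.foldl
      (fun (s : List Int × Bool) x => (s.1 ++ [if s.2 then x + n else x], !s.2))
      ([], true)).1).reverse).length = arr.length := by
    rw [pv_foldl_mark]
    simp [pvMark_length]
  have hBgd : ∀ (j : Nat), j < arr.length →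
      (((arr.reverse.foldl
        (fun (s : List Int × Bool) x => (s.1 ++ [if s.2 then x + n else x], !s.2))
        ([], true)).1).reverse).getD j 0
      = arr.getD j 0 + (if ((arr.length - 1 - j) % 2 == 0) then n else 0) := by
    intro j hj
    rw [pv_foldl_mark]
    simp only [List.nil_append]
    have hlen : (pvMark n arr.reverse true).length = arr.length := by
      simp [pvMark_length]
    have hj' : j < (pvMark n arr.reverse true).reverse.length := by simp [hlen]; exact hj
    rw [List.getD_eq_getElem _ 0 hj', List.getElem_reverse, ← List.getD_eq_getElem _ 0,
        hlen, pvMark_getD n arr.reverse true _ (by simp; omega)]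
    have hi2 : arr.length - 1 - j < arr.reverse.length := by simp; omega
    rw [List.getD_eq_getElem _ 0 hi2, List.getElem_reverse, ← List.getD_eq_getElem _ 0]
    have hidx : arr.length - 1 - (arr.length - 1 - j) = j := by omega
    rw [hidx]
    simp
  apply List.ext_getElem
  · split <;> rw [pv_foldl_upd_length, hBlen]
  · intro j hjA hjB
    have hjarr : j < arr.length := by rw [hBlen] at hjB; exact hjB
    have hgd : ∀ (xs : List Int) (h : j < xs.length), xs[j]'h = xs.getD j 0 := by
      intro xs h; exact (List.getD_eq_getElem xs 0 h).symm
    rw [hgd _ hjA, hgd _ hjB, hBgd j hjarr]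
    by_cases hpar : l % 2 = 1
    · rw [if_pos (show (PySem.Int.mod l 2 == 1) = true by rw [hmod1]; simpa using hpar)]
      rw [pv_foldl_upd_getD n _ _ arr hbound1 j hjarr,
          pv_count_filter_nodup _ _ _ (PySem.List.nodup_pyRange_one 0 l)]
      have hAj : ((j : Int) ∈ PySem.List.pyRange 0 l 1 ∧ (PySem.Int.mod (j : Int) 2 == 0) = true)
          ↔ ((arr.length - 1 - j) % 2 = 0) := by
        rw [PySem.List.mem_pyRange_one,
            show PySem.Int.mod (j : Int) 2 = (j : Int) % 2 from PySem.Int.mod_eq_emod_of_pos (by norm_num)]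
        simp only [beq_iff_eq]
        constructor
        · intro ⟨_, hj2⟩; omega
        · intro h; refine ⟨⟨by omega, by omega⟩, by omega⟩
      by_cases hc : (arr.length - 1 - j) % 2 = 0
      · rw [if_pos (hAj.mpr hc), if_pos (by simpa using hc)]; ring
      · rw [if_neg (fun h => hc (hAj.mp h)), if_neg (by simpa using hc)]; ring
    · rw [if_neg (show ¬ (PySem.Int.mod l 2 == 1) = true by rw [hmod1]; simp; omega)]
      rw [pv_foldl_upd_getD n _ _ arr hbound1 j hjarr,
          pv_count_filter_nodup _ _ _ (PySem.List.nodup_pyRange_one 0 l)]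
      have hAj : ((j : Int) ∈ PySem.List.pyRange 0 l 1 ∧ (PySem.Int.mod (j : Int) 2 == 1) = true)
          ↔ ((arr.length - 1 - j) % 2 = 0) := by
        rw [PySem.List.mem_pyRange_one,
            show PySem.Int.mod (j : Int) 2 = (j : Int) % 2 from PySem.Int.mod_eq_emod_of_pos (by norm_num)]
        simp only [beq_iff_eq]
        constructor
        · intro ⟨_, hj2⟩; omega
        · intro h; refine ⟨⟨by omega, by omega⟩, by omega⟩
      by_cases hc : (arr.length - 1 - j) % 2 = 0
      · rw [if_pos (hAj.mpr hc), if_pos (by simpa using hc)]; ring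
      · rw [if_neg (fun h => hc (hAj.mp h)), if_neg (by simpa using hc)]; ring
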